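-- pv_equiv track=rewrite | github.com/clintjohnsn/ds-algo | hashmaps/medium/anagrams.py | dr
-- ===== SOURCE A (Python) =====
-- def dr(subst):
--     k = {}
--     for i in subst:
--         if i in k:
--             k[i]+=1
--         else:
--             k[i] = 1
--     return "".join([str((key,k[key])) for key in sorted(k.keys())])
-- ===== SOURCE B (Python) =====
-- def dr(subst):
--     # sort all characters, then one run-length pass over the sorted list
--     parts = []
--     prev = None
--     n = 0
--     for c in sorted(subst):
--         if c == prev:
--             n += 1
--         else:
--             if prev is not None:
--                 parts.append(str((prev, n)))
--             prev = c
--             n = 1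
--     if prev is not None:
--         parts.append(str((prev, n)))
--     return "".join(parts)
-- ===== Notes on version B (the rewrite author's own statement) =====
-- stated objective: alternative
-- what changed: Replaces the build-a-count-dict-then-sort-unique-keys strategy by sorting the whole string once and emitting the tuple reprs in a single run-length pass over the sorted characters.
import Mathlib
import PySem

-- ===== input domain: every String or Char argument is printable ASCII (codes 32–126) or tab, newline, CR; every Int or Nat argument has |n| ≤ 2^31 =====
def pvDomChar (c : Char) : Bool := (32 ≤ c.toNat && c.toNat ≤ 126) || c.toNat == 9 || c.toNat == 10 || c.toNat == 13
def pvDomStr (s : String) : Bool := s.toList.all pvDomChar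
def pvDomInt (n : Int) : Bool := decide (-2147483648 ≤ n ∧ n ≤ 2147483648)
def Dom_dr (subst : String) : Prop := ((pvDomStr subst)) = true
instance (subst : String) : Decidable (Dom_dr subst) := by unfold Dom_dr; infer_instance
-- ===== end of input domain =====

-- B sorts the string once and emits the tuple reprs in one run-length pass, instead of
-- building a count dict and then sorting its unique keys (alternative algorithm, same result).

-- shared helper: Python's repr of a one-character string (exact on the Dom_dr characters)
def chRepr (c : Char) : List Char :=
  if c = '\'' then ['"', '\'', '"']
  else '\'' ::
    (if c = '\\' then ['\\', '\\']
     else if c = Char.ofNat 9 then ['\\', 't']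
     else if c = Char.ofNat 10 then ['\\', 'n']
     else if c = Char.ofNat 13 then ['\\', 'r']
     else [c]) ++ ['\'']

-- shared helper: Python's str((c, n)) for a one-character string c and an int n
def tupStr (c : Char) (n : Int) : String :=
  String.ofList ('(' :: chRepr c ++ ',' :: ' ' :: PySem.Int.toChars n ++ [')'])

-- ===== PORT A =====
def dr (subst : String) : String :=
  let k := subst.toList.foldl
    (fun d i => if d.contains i then d.insert i (d.getD i 0 + 1) else d.insert i 1)
    (PySem.Dict.empty : PySem.Dict Char Int)
  PySem.Str.join ""
    ((PySem.List.sorted k.keys (fun x => x) false).map (fun key => tupStr key (k.getD key 0)))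

-- ===== PORT B =====
-- one step of B's run-length loop: state = (parts, current char (None at start), run length)
def drAltStep (st : List String × Option Char × Int) (c : Char) :
    List String × Option Char × Int :=
  match st with
  | (parts, prev, n) =>
    if some c = prev then (parts, prev, n + 1)
    else
      (parts ++ (match prev with | none => [] | some p => [tupStr p n]), some c, 1)

def dr_alt (subst : String) : String :=
  match (PySem.List.sorted subst.toList (fun x => x) false).foldl drAltStep ([], none, 0) with
  | (parts, prev, n) =>
    PySem.Str.join ""
      (parts ++ (match prev with | none => [] | some p => [tupStr p n]))

-- ===== PRECONDITION & SPEC =====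
def Spec_dr (subst : String) (out : String) : Prop := out = dr_alt subst
instance (subst : String) (out : String) : Decidable (Spec_dr subst out) := by unfold Spec_dr; infer_instance

-- ===== CLAIM (what is proved, stated in full; the proofs are below) =====
def Claim_equal_dr : Prop := ∀ (subst : String), Dom_dr subst → Spec_dr subst (dr subst)

-- ===== LEMMAS AND PROOFS =====

-- proof-side model of B's run-length loop, as a plain recursion
def rle (c : Char) (n : Int) : List Char → List String
  | [] => [tupStr c n]
  | d :: rest => if d = c then rle c (n + 1) rest else tupStr c n :: rle d 1 rest

-- the distinct elements of s in order of first occurrence (run heads when s is sorted)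
def heads : List Char → List Char
  | [] => []
  | d :: rest => d :: heads (rest.filter (· ≠ d))
termination_by l => l.length
decreasing_by
  simp only [List.length_unattach, List.length_cons]
  exact Nat.lt_succ_of_le (le_trans (List.length_filter_le _ _) (by simp))

-- the run-length output of a sorted list, one group at a time
def runs : List Char → List String
  | [] => []
  | d :: rest => tupStr d (1 + rest.count d) :: runs (rest.filter (· ≠ d))
termination_by l => l.length
decreasing_by
  simp only [List.length_unattach, List.length_cons]
  exact Nat.lt_succ_of_le (le_trans (List.length_filter_le _ _) (by simp))

def finalize (st : List String × Option Char × Int) : List String :=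
  match st with
  | (parts, prev, n) => parts ++ (match prev with | none => [] | some p => [tupStr p n])

theorem mem_heads (s : List Char) (x : Char) : x ∈ heads s ↔ x ∈ s := by
  induction hn : s.length using Nat.strong_induction_on generalizing s with
  | _ n ih =>
    match s with
    | [] => simp [heads]
    | d :: rest =>
      rw [heads]
      have hlt : (rest.filter (· ≠ d)).length < n := by
        subst hn; simpa using Nat.lt_succ_of_le (List.length_filter_le _ _)
      simp only [List.mem_cons, ih _ hlt _ rfl, List.mem_filter]
      by_cases hx : x = d <;> simp [hx]

theorem heads_pairwise_lt (s : List Char) (h : s.Pairwise (· ≤ ·)) :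
    (heads s).Pairwise (· < ·) := by
  induction hn : s.length using Nat.strong_induction_on generalizing s with
  | _ n IH =>
  match s with
  | [] => simp [heads]
  | d :: rest =>
    have hlt : (rest.filter (· ≠ d)).length < n := by
      subst hn; simpa using Nat.lt_succ_of_le (List.length_filter_le _ _)
    have ih := fun hp => IH _ hlt (rest.filter (· ≠ d)) hp rfl
    rw [heads]
    rcases List.pairwise_cons.mp h with ⟨hd, hrest⟩
    refine List.pairwise_cons.mpr ⟨?_, ih (List.Pairwise.filter _ hrest)⟩
    intro y hy
    have hmem := (mem_heads _ y).mp hy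
    rcases List.mem_filter.mp hmem with ⟨hyr, hne⟩
    exact lt_of_le_of_ne (hd y hyr) (by simpa [eq_comm] using of_decide_eq_true hne)

theorem runs_eq_map (s : List Char) :
    runs s = (heads s).map (fun c => tupStr c (s.count c)) := by
  induction hn : s.length using Nat.strong_induction_on generalizing s with
  | _ n IH =>
  match s with
  | [] => simp [runs, heads]
  | d :: rest =>
    have hlt : (rest.filter (· ≠ d)).length < n := by
      subst hn; simpa using Nat.lt_succ_of_le (List.length_filter_le _ _)
    have ih := IH _ hlt (rest.filter (· ≠ d)) rfl
    rw [runs, heads, ih, List.map_cons]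
    congr 1
    · simp [List.count_cons_self]; ring_nf
    · apply List.map_congr_left
      intro c hc
      have hcm := (mem_heads _ c).mp hc
      have hne : c ≠ d := by
        rcases List.mem_filter.mp hcm with ⟨_, h2⟩
        simpa using of_decide_eq_true h2
      simp [List.count_filter, hne, Ne.symm hne]

theorem foldl_drAltStep (rest : List Char) :
    ∀ (parts : List String) (c : Char) (n : Int),
    finalize (rest.foldl drAltStep (parts, some c, n)) = parts ++ rle c n rest := by
  induction rest with
  | nil => intro parts c n; simp [finalize, rle]
  | cons d rest ih =>
    intro parts c n
    rw [rle, List.foldl_cons]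
    by_cases hdc : d = c
    · simp [drAltStep, hdc, ih]
    · simp only [drAltStep, Option.some.injEq, if_neg hdc, ih]
      simp

theorem rle_eq (rest : List Char) :
    ∀ (c : Char) (n : Int), (c :: rest).Pairwise (· ≤ ·) →
    rle c n rest = tupStr c (n + rest.count c) :: runs (rest.filter (· ≠ c)) := by
  induction rest with
  | nil => intro c n _; simp [rle, runs]
  | cons d rest ih =>
    intro c n h
    rcases List.pairwise_cons.mp h with ⟨hc, hrest⟩
    rcases List.pairwise_cons.mp hrest with ⟨hd, hrr⟩
    by_cases hdc : d = c
    · subst hdc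
      rw [rle, if_pos rfl, ih d (n + 1) hrest]
      rw [List.count_cons_self, List.filter_cons]
      congr 1
      · congr 1; push_cast; ring
      · simp
    · have hcd : c < d := lt_of_le_of_ne (hc d (by simp)) (fun h' => hdc h'.symm)
      have hcnt : rest.count c = 0 :=
        List.count_eq_zero.mpr (fun hmem => absurd (hd c hmem) (not_le.mpr hcd))
      have hcnt2 : (d :: rest).count c = 0 := by
        simp [hcnt, hdc]
      have hfilter : (d :: rest).filter (· ≠ c) = d :: rest :=
        List.filter_eq_self.mpr (by
          intro x hx
          rcases List.mem_cons.mp hx with h1 | h2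
          · subst h1; simpa using hdc
          · simpa using ne_of_gt (lt_of_lt_of_le hcd (hd x h2)))
      rw [rle, if_neg hdc, ih d 1 hrest, hcnt2, hfilter, runs]
      simp

-- A's dict-building loop is collections.Counter
theorem foldA_eq_counter (l : List Char) :
    l.foldl (fun d i => if d.contains i then d.insert i (d.getD i 0 + 1) else d.insert i 1)
      (PySem.Dict.empty : PySem.Dict Char Int) = PySem.Dict.counter l := by
  rw [← PySem.Dict.foldl_insert_getD_add_one_eq_counter]
  apply PySem.List.foldl_congr_mem
  intro d i _
  by_cases hci : d.contains i
  · simp [hci]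
  · simp only [Bool.not_eq_true] at hci
    rw [PySem.Dict.getD_of_not_contains _ _ hci]
    simp [hci]

-- sorting the distinct chars of l = the run heads of the sorted l
theorem heads_sorted_eq (l : List Char) :
    PySem.List.sorted (PySem.Set.ofList l) (fun x => x) false
      = heads (PySem.List.sorted l (fun x => x) false) := by
  apply PySem.List.sorted_eq_of_perm_of_pairwise_lt
  · apply (List.perm_ext_iff_of_nodup ?_ ?_).mpr
    · intro a
      rw [mem_heads, PySem.Set.mem_ofList]
      exact (PySem.List.sorted_perm l (fun x => x) false).mem_iff
    · exact (heads_pairwise_lt _ (PySem.List.sorted_pairwise l (fun x => x))).imp ne_of_lt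
    · exact PySem.Set.nodup_ofList l
  · exact heads_pairwise_lt _ (PySem.List.sorted_pairwise l (fun x => x))

theorem b_eq_runs (l : List Char) :
    finalize ((PySem.List.sorted l (fun x => x) false).foldl drAltStep ([], none, 0))
      = runs (PySem.List.sorted l (fun x => x) false) := by
  rcases hs : PySem.List.sorted l (fun x => x) false with _ | ⟨c, rest⟩
  · simp [finalize, runs]
  · have hp : (c :: rest).Pairwise (· ≤ ·) := by
      rw [← hs]; exact PySem.List.sorted_pairwise l (fun x => x)
    rw [List.foldl_cons]
    have hstep : drAltStep ([], none, 0) c = ([], some c, 1) := by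
      simp [drAltStep]
    rw [hstep, foldl_drAltStep, rle_eq rest c 1 hp, runs]
    simp

-- ===== VERDICT (by name: the statement is the Claim_ definition above) =====
theorem dr_spec : Claim_equal_dr := by
  intro s _
  unfold Spec_dr
  have halt : dr_alt s
      = PySem.Str.join "" (finalize ((PySem.List.sorted s.toList (fun x => x) false).foldl drAltStep ([], none, 0))) := by
    unfold dr_alt finalize
    rcases (PySem.List.sorted s.toList (fun x => x) false).foldl drAltStep ([], none, 0) with ⟨parts, prev, n⟩
    rfl
  rw [halt, b_eq_runs, runs_eq_map]
  unfold dr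
  simp only [foldA_eq_counter]
  rw [PySem.Dict.keys_counter, heads_sorted_eq]
  congr 1
  apply List.map_congr_left
  intro c _
  rw [PySem.Dict.getD_counter, (PySem.List.sorted_perm s.toList (fun x => x) false).count_eq]
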